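-- pv_equiv track=rewrite | github.com/volcengine/verl | atropos/environments/intern_bootcamp/internbootcamp_lib/internbootcamp/libs/calcudoku/calcudoku_generator.py | _calculate_target
-- ===== SOURCE A (Python) =====
-- def _calculate_target(op, values):
--     """
--     Given an operation (op) and a list of integer values, return the target value if it is
--     valid (positive integer, etc.) for the group, otherwise None.
--     """
--     if op == '+':
--         return sum(values)
--     elif op == '*':
--         prod = 1
--         for v in values:
--             prod *= v
--         return prod
--     elif op == '-':
--         # For subtraction, standard KenKen typically only has 2 cells.
--         # But let's handle any size: we check if there's a permutation p of values
--         # so that p[0] - p[1] - ... p[n-1] is a positive integer.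
--         # We'll just pick the difference as max(val) - sum(others) for 2-cell groups, or do a check for multi-cell.
--         if len(values) == 2:
--             a, b = values[0], values[1]
--             diff1 = a - b
--             diff2 = b - a
--             # Must be positive
--             if diff1 > 0:
--                 return abs(diff1)
--             elif diff2 > 0:
--                 return abs(diff2)
--             else:
--                 return None
--         else:
--             # For multi-cell difference, let's see if any permutation yields a positive result
--             from itertools import permutations
--             for p in permutations(values):
--                 result = p[0]
--                 for x in p[1:]:
--                     result -= x
--                 if result > 0:
--                     return result
--             return None
--
--     elif op == '/':
--         # For division, typically 2 cells. If bigger, we check permutations similarly.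
--         # For 2 cells, we just do int division check.
--         if len(values) == 2:
--             a, b = values[0], values[1]
--             # We want either a/b or b/a to be a positive integer
--             if a >= b and a % b == 0:
--                 return a // b
--             elif b > a and b % a == 0:
--                 return b // a
--             else:
--                 return None
--         else:
--             # multi-cell division check
--             from itertools import permutations
--             for p in permutations(values):
--                 numerator = p[0]
--                 ok = True
--                 for x in p[1:]:
--                     if numerator % x != 0:
--                         ok = False
--                         break
--                     numerator //= x
--                 if ok and numerator > 0:
--                     return numerator
--             return None
--     # If we reach here:
--     return None
-- ===== SOURCE B (Python) =====
-- def _calculate_target(op, values):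
--     if op == '+':
--         return sum(values)
--     if op == '*':
--         prod = 1
--         for v in values:
--             prod *= v
--         return prod
--     if op == '-':
--         # result of A's permutation search depends only on the element placed first:
--         # first value v (in index order) with 2*v > sum(values) wins.
--         s = sum(values)
--         for v in values:
--             if 2 * v > s:
--                 return 2 * v - s
--         return None
--     if op == '/':
--         if len(values) == 2:
--             a, b = values[0], values[1]
--             if a >= b and a % b == 0:
--                 return a // b
--             if b > a and b % a == 0:
--                 return b // a
--             return None
--         # a division chain starting from v succeeds iff the product of the others divides v;
--         # scan first elements in index order.
--         p = 1
--         for v in values: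
--             p *= v
--         for v in values:
--             if v != 0:
--                 rest = p // v          # exact: v is a factor of p
--                 if rest != 0 and v % rest == 0:
--                     q = v // rest
--                     if q > 0:
--                         return q
--         return None
--     return None
-- ===== Notes on version B (the rewrite author's own statement) =====
-- stated objective: alternative
-- what changed: For '-' and '/' on non-2-cell groups B replaces A's scan over all permutations by a single index-order scan over candidate first elements, using that the permutation result depends only on the element placed first (subtraction result is 2*v - sum; a division chain from v succeeds iff the product of the others divides v).
-- crash fix: A raises IndexError on '-' or '/' applied to an empty list and ZeroDivisionError on '/' applied to a list of length >= 3 containing 0; B returns None there. — e.g. on _calculate_target("/", [0, 2, 3]): A raises ZeroDivisionError, B returns none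
import Mathlib
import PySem

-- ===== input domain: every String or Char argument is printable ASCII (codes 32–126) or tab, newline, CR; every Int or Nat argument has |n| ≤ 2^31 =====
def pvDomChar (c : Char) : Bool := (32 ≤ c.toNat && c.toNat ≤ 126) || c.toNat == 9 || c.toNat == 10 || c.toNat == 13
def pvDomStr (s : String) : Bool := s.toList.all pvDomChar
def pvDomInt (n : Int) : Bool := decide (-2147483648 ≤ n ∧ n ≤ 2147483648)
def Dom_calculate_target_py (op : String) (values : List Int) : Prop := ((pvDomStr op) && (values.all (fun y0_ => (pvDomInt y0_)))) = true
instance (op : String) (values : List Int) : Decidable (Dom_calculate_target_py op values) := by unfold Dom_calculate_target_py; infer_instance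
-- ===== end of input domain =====

-- B replaces A's permutation search for '-' and '/' by a single index-order scan over
-- possible first elements (the permutation result depends only on the element placed first);
-- objective: alternative.

-- ===== PORT A =====
-- A's '-' loop over permutations: result = p[0] - (sum of the rest); p = [] is the IndexError
-- on empty input (excluded by Pre_), rendered as none.
def pvSubPerms : List (List Int) → Option Int
  | [] => none
  | p :: ps =>
    match p with
    | [] => none
    | x :: rest =>
      let result := rest.foldl (· - ·) x
      if result > 0 then some result else pvSubPerms ps

-- A's '/' inner chain: numerator //= x with break on x ∤ numerator; x = 0 is the
-- ZeroDivisionError (excluded by Pre_), rendered as none.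
def pvDivChain : Int → List Int → Option Int
  | num, [] => some num
  | num, x :: xs =>
    if x = 0 then none
    else if PySem.Int.mod num x ≠ 0 then none
    else pvDivChain (PySem.Int.floordiv num x) xs

def pvDivPerms : List (List Int) → Option Int
  | [] => none
  | p :: ps =>
    match p with
    | [] => none
    | x :: rest =>
      match pvDivChain x rest with
      | some num => if num > 0 then some num else pvDivPerms ps
      | none => pvDivPerms ps

def calculate_target_py (op : String) (values : List Int) : Option Int :=
  if op == "+" then some values.sum
  else if op == "*" then some (values.foldl (· * ·) 1)
  else if op == "-" then
    if values.length == 2 then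
      match values with
      | a :: b :: _ =>
        let diff1 := a - b
        let diff2 := b - a
        if diff1 > 0 then some |diff1|
        else if diff2 > 0 then some |diff2|
        else none
      | _ => none
    else pvSubPerms (PySem.List.permutations values values.length)
  else if op == "/" then
    if values.length == 2 then
      match values with
      | a :: b :: _ =>
        if a ≥ b then
          if b = 0 then none
          else if PySem.Int.mod a b == 0 then some (PySem.Int.floordiv a b) else none
        else
          if a = 0 then none
          else if PySem.Int.mod b a == 0 then some (PySem.Int.floordiv b a) else none
      | _ => none
    else pvDivPerms (PySem.List.permutations values values.length)
  else none

-- ===== PORT B =====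
def pvSubScan (s : Int) : List Int → Option Int
  | [] => none
  | v :: vs => if 2 * v > s then some (2 * v - s) else pvSubScan s vs

def pvDivScan (p : Int) : List Int → Option Int
  | [] => none
  | v :: vs =>
    if v ≠ 0 then
      let rest := PySem.Int.floordiv p v
      if rest ≠ 0 ∧ PySem.Int.mod v rest = 0 then
        let q := PySem.Int.floordiv v rest
        if q > 0 then some q else pvDivScan p vs
      else pvDivScan p vs
    else pvDivScan p vs

def calculate_target_py_alt (op : String) (values : List Int) : Option Int :=
  if op == "+" then some values.sum
  else if op == "*" then some (values.foldl (· * ·) 1)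
  else if op == "-" then pvSubScan values.sum values
  else if op == "/" then
    if values.length == 2 then
      let a := values.getD 0 0
      let b := values.getD 1 0
      if a ≥ b then
        if b = 0 then none
        else if PySem.Int.mod a b == 0 then some (PySem.Int.floordiv a b) else none
      else
        if a = 0 then none
        else if PySem.Int.mod b a == 0 then some (PySem.Int.floordiv b a) else none
    else pvDivScan (values.foldl (· * ·) 1) values
  else none

-- ===== PRECONDITION & SPEC =====
-- Pre_ excludes exactly the inputs on which the Python A raises: '-' or '/' on [] (IndexError
-- from p[0]), '/' on two cells whose evaluated divisor is 0 (ZeroDivisionError), and '/' on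
-- three or more cells containing a 0 (ZeroDivisionError inside the permutation loop).
def Pre_calculate_target_py (op : String) (values : List Int) : Prop :=
  ¬ ((op = "-" ∧ values = []) ∨
     (op = "/" ∧ (values = [] ∨
       (values.length = 2 ∧ ((values.getD 1 1 = 0 ∧ 0 ≤ values.getD 0 1) ∨
                             (values.getD 0 1 = 0 ∧ 0 < values.getD 1 1))) ∨
       (3 ≤ values.length ∧ (0:Int) ∈ values))))
instance (op : String) (values : List Int) : Decidable (Pre_calculate_target_py op values) := by
  unfold Pre_calculate_target_py; infer_instance

def pvWitness_calculate_target_py : String × List Int := ("-", [3, 1, 1])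

-- A raises (IndexError or ZeroDivisionError) on '-'/'/' applied to [] and on '/' applied to a
-- list of length ≥ 3 containing 0; B returns None there.
def Raises_calculate_target_py (op : String) (values : List Int) : Prop :=
  (values = [] ∧ (op = "-" ∨ op = "/")) ∨ (op = "/" ∧ 3 ≤ values.length ∧ (0:Int) ∈ values)
instance (op : String) (values : List Int) : Decidable (Raises_calculate_target_py op values) := by
  unfold Raises_calculate_target_py; infer_instance

def pvRaiseWitness_calculate_target_py : String × List Int := ("/", [0, 2, 3])
def pvRaiseWitnessOut_calculate_target_py : Option Int := none

def Spec_calculate_target_py (op : String) (values : List Int) (out : Option Int) : Prop := out = calculate_target_py_alt op values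
instance (op : String) (values : List Int) (out : Option Int) : Decidable (Spec_calculate_target_py op values out) := by unfold Spec_calculate_target_py; infer_instance

-- ===== CLAIM (what is proved, stated in full; the proofs are below) =====
def Claim_equal_calculate_target_py : Prop := ∀ (op : String) (values : List Int), Dom_calculate_target_py op values → Pre_calculate_target_py op values → Spec_calculate_target_py op values (calculate_target_py op values)

def Claim_raises_calculate_target_py : Prop := (∀ (op : String) (values : List Int), Dom_calculate_target_py op values → Raises_calculate_target_py op values → ¬ Pre_calculate_target_py op values) ∧ (Dom_calculate_target_py (pvRaiseWitness_calculate_target_py.1) (pvRaiseWitness_calculate_target_py.2) ∧ Raises_calculate_target_py (pvRaiseWitness_calculate_target_py.1) (pvRaiseWitness_calculate_target_py.2) ∧ calculate_target_py_alt (pvRaiseWitness_calculate_target_py.1) (pvRaiseWitness_calculate_target_py.2) = pvRaiseWitnessOut_calculate_target_py)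

-- ===== LEMMAS AND PROOFS =====

theorem pv_foldl_sub (l : List Int) (x : Int) : l.foldl (· - ·) x = x - l.sum := by
  induction l generalizing x with
  | nil => simp
  | cons y ys ih => rw [List.foldl_cons, ih, List.sum_cons]; ring

theorem pv_sum_eraseIdx (l : List Int) (i : Nat) (h : i < l.length) :
    (l.eraseIdx i).sum = l.sum - l[i] := by
  induction l generalizing i with
  | nil => simp at h
  | cons x xs ih =>
    cases i with
    | zero => simp
    | succ j =>
      simp only [List.length_cons, Nat.add_lt_add_iff_right] at h
      rw [List.eraseIdx_cons_succ, List.sum_cons, List.sum_cons, ih j h, List.getElem_cons_succ]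
      ring

theorem pv_prod_eraseIdx (l : List Int) (i : Nat) (h : i < l.length) :
    l.prod = l[i] * (l.eraseIdx i).prod := by
  induction l generalizing i with
  | nil => simp at h
  | cons x xs ih =>
    cases i with
    | zero => simp
    | succ j =>
      simp only [List.length_cons, Nat.add_lt_add_iff_right] at h
      rw [List.eraseIdx_cons_succ, List.prod_cons, List.prod_cons, ih j h, List.getElem_cons_succ]
      ring

theorem pv_perms_ne_nil (n : Nat) (l : List Int) (h : l.length = n) :
    PySem.List.permutations l n ≠ [] := by
  induction n generalizing l with
  | zero => simp [PySem.List.permutations_zero]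
  | succ m ih =>
    cases l with
    | nil => simp at h
    | cons x xs =>
      have hx : xs.length = m := by simpa using h
      have hne := ih xs hx
      cases hperm : PySem.List.permutations xs m with
      | nil => exact absurd hperm hne
      | cons p ps =>
        rw [PySem.List.permutations_succ]
        apply List.ne_nil_of_mem (a := x :: p)
        rw [List.mem_flatMap]
        exact ⟨0, by simp, by simp [hperm]⟩

theorem pv_subPerms_append (as bs : List (List Int)) (h : ∀ p ∈ as, p ≠ []) :
    pvSubPerms (as ++ bs) = (pvSubPerms as).or (pvSubPerms bs) := by
  induction as with
  | nil => simp [pvSubPerms]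
  | cons p ps ih =>
    have hp : p ≠ [] := h p (by simp)
    cases p with
    | nil => exact absurd rfl hp
    | cons x rest =>
      simp only [List.cons_append, pvSubPerms]
      split_ifs with hc
      · simp [Option.or]
      · exact ih (fun q hq => h q (by simp [hq]))

theorem pv_divPerms_append (as bs : List (List Int)) (h : ∀ p ∈ as, p ≠ []) :
    pvDivPerms (as ++ bs) = (pvDivPerms as).or (pvDivPerms bs) := by
  induction as with
  | nil => simp [pvDivPerms]
  | cons p ps ih =>
    have hp : p ≠ [] := h p (by simp)
    cases p with
    | nil => exact absurd rfl hp
    | cons x rest =>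
      simp only [List.cons_append, pvDivPerms]
      cases hch : pvDivChain x rest with
      | none =>
        dsimp only
        exact ih (fun q hq => h q (by simp [hq]))
      | some num =>
        dsimp only
        split_ifs with hc
        · simp [Option.or]
        · exact ih (fun q hq => h q (by simp [hq]))

theorem pv_subPerms_block (ps : List (List Int)) (v t : Int) (hne : ps ≠ [])
    (hs : ∀ p ∈ ps, p.sum = t) :
    pvSubPerms (ps.map (v :: ·)) = if v - t > 0 then some (v - t) else none := by
  induction ps with
  | nil => exact absurd rfl hne
  | cons p ps' ih =>
    have hp : p.sum = t := hs p (by simp)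
    simp only [List.map_cons, pvSubPerms, pv_foldl_sub, hp]
    split_ifs with hc
    · rfl
    · cases ps' with
      | nil => simp [List.map_nil, pvSubPerms]
      | cons q qs =>
        rw [ih (by simp) (fun r hr => hs r (by simp [hr])), if_neg hc]

theorem pv_divChain_dvd (q : List Int) (v : Int) (h0 : (0:Int) ∉ q) (hd : q.prod ∣ v) :
    pvDivChain v q = some (v / q.prod) := by
  induction q generalizing v with
  | nil => simp [pvDivChain]
  | cons x xs ih =>
    have hx : x ≠ 0 := fun hx => h0 (by simp [hx])
    have hxs : (0:Int) ∉ xs := fun hm => h0 (by simp [hm])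
    have hxv : x ∣ v := dvd_trans (Dvd.intro _ rfl) (by simpa [List.prod_cons] using hd)
    obtain ⟨c, rfl⟩ := hxv
    have hprod : xs.prod ∣ c := (mul_dvd_mul_iff_left hx).mp (by rwa [List.prod_cons] at hd)
    have hmod : PySem.Int.mod (x * c) x = 0 :=
      (PySem.Int.mod_eq_zero_iff_dvd _ _).mpr (Dvd.intro _ rfl)
    have hfd : PySem.Int.floordiv (x * c) x = c := by
      have : PySem.Int.floordiv (x * c) x = (x * c) / x :=
        Int.fdiv_eq_ediv_of_dvd (Dvd.intro _ rfl)
      rw [this, Int.mul_ediv_cancel_left _ hx]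
    simp only [pvDivChain, hx, if_false, hmod, hfd, ne_eq, not_true_eq_false]
    rw [ih c hxs hprod]
    congr 1
    have hp0 : xs.prod ≠ 0 := List.prod_ne_zero hxs
    obtain ⟨d, rfl⟩ := hprod
    rw [List.prod_cons, Int.mul_ediv_cancel_left _ hp0,
      show x * (xs.prod * d) = x * xs.prod * d by ring,
      Int.mul_ediv_cancel_left _ (mul_ne_zero hx hp0)]

theorem pv_divChain_not_dvd (q : List Int) (v : Int) (h0 : (0:Int) ∉ q) (hd : ¬ q.prod ∣ v) :
    pvDivChain v q = none := by
  induction q generalizing v with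
  | nil => simp at hd
  | cons x xs ih =>
    have hx : x ≠ 0 := fun hx => h0 (by simp [hx])
    have hxs : (0:Int) ∉ xs := fun hm => h0 (by simp [hm])
    by_cases hxv : x ∣ v
    · obtain ⟨c, rfl⟩ := hxv
      have hmod : PySem.Int.mod (x * c) x = 0 :=
        (PySem.Int.mod_eq_zero_iff_dvd _ _).mpr (Dvd.intro _ rfl)
      have hfd : PySem.Int.floordiv (x * c) x = c := by
        have : PySem.Int.floordiv (x * c) x = (x * c) / x :=
          Int.fdiv_eq_ediv_of_dvd (Dvd.intro _ rfl)
        rw [this, Int.mul_ediv_cancel_left _ hx]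
      have hprod : ¬ xs.prod ∣ c := fun hc =>
        hd (by rw [List.prod_cons]; exact mul_dvd_mul_left x hc)
      simp only [pvDivChain, hx, if_false, hmod, hfd, ne_eq, not_true_eq_false]
      exact ih c hxs hprod
    · have hmod : PySem.Int.mod v x ≠ 0 := by
        rw [ne_eq, PySem.Int.mod_eq_zero_iff_dvd]; exact hxv
      simp [pvDivChain, hx, hmod]

theorem pv_divPerms_block (ps : List (List Int)) (v t : Int) (hne : ps ≠ [])
    (hs : ∀ p ∈ ps, (0:Int) ∉ p ∧ p.prod = t) :
    pvDivPerms (ps.map (v :: ·)) = if t ∣ v ∧ 0 < v / t then some (v / t) else none := by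
  induction ps with
  | nil => exact absurd rfl hne
  | cons p ps' ih =>
    obtain ⟨hp0, hpt⟩ := hs p (by simp)
    have htail : ps' ≠ [] →
        pvDivPerms (ps'.map (v :: ·)) = if t ∣ v ∧ 0 < v / t then some (v / t) else none :=
      fun hne' => ih hne' (fun r hr => hs r (by simp [hr]))
    simp only [List.map_cons, pvDivPerms]
    by_cases hd : t ∣ v
    · rw [pv_divChain_dvd p v hp0 (by rw [hpt]; exact hd), hpt]
      dsimp only
      by_cases hc : v / t > 0
      · rw [if_pos hc, if_pos ⟨hd, hc⟩]
      · rw [if_neg hc, if_neg (fun h => hc h.2)]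
        cases ps' with
        | nil => rfl
        | cons q qs => rw [htail (by simp), if_neg (fun h => hc h.2)]
    · rw [pv_divChain_not_dvd p v hp0 (by rw [hpt]; exact hd)]
      dsimp only
      rw [if_neg (fun h => hd h.1)]
      cases ps' with
      | nil => rfl
      | cons q qs => rw [htail (by simp), if_neg (fun h => hd h.1)]

theorem pv_map_getD_range (l : List Int) :
    (List.range l.length).map (fun i => l.getD i 0) = l := by
  apply List.ext_getElem
  · simp
  · intro j h1 h2
    simp only [List.getElem_map, List.getElem_range]
    exact List.getD_eq_getElem l 0 h2

theorem pv_sub_flatMap (idxs : List Nat) (l : List Int) (n : Nat)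
    (hl : l.length = n + 1) (hidx : ∀ i ∈ idxs, i < n + 1) :
    pvSubPerms (idxs.flatMap
      (fun i => match l[i]? with
        | none => []
        | some x => (PySem.List.permutations (l.eraseIdx i) n).map (x :: ·))) =
    pvSubScan l.sum (idxs.map (fun i => l.getD i 0)) := by
  induction idxs with
  | nil => simp [pvSubPerms, pvSubScan]
  | cons i is ih =>
    have hi : i < l.length := by rw [hl]; exact hidx i (by simp)
    have hget : l[i]? = some l[i] := List.getElem?_eq_getElem hi
    have herase : (l.eraseIdx i).length = n := by
      rw [List.length_eraseIdx, if_pos hi]; omega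
    simp only [List.flatMap_cons, hget, List.map_cons]
    rw [pv_subPerms_append _ _ (by intro p hp; simp only [List.mem_map] at hp; obtain ⟨q, _, rfl⟩ := hp; simp)]
    rw [pv_subPerms_block _ l[i] (l.eraseIdx i).sum
      (by intro hnil; exact pv_perms_ne_nil n _ herase hnil)
      (by intro p hp
          have := PySem.List.perm_of_mem_permutations (xs := l.eraseIdx i) (p := p) (herase ▸ hp)
          exact this.sum_eq)]
    rw [ih (fun j hj => hidx j (by simp [hj]))]
    rw [pv_sum_eraseIdx l i hi]
    simp only [pvSubScan, List.getD_eq_getElem l 0 hi]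
    have hval : l[i] - (l.sum - l[i]) = 2 * l[i] - l.sum := by ring
    by_cases hpos : 2 * l[i] > l.sum
    · rw [if_pos (by omega : l[i] - (l.sum - l[i]) > 0), hval, if_pos hpos, Option.some_or]
    · rw [if_neg (by omega : ¬ l[i] - (l.sum - l[i]) > 0), if_neg hpos, Option.none_or]

theorem pv_div_flatMap (idxs : List Nat) (l : List Int) (n : Nat)
    (hl : l.length = n + 1) (h0 : (0:Int) ∉ l) (hidx : ∀ i ∈ idxs, i < n + 1) :
    pvDivPerms (idxs.flatMap
      (fun i => match l[i]? with
        | none => []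
        | some x => (PySem.List.permutations (l.eraseIdx i) n).map (x :: ·))) =
    pvDivScan l.prod (idxs.map (fun i => l.getD i 0)) := by
  induction idxs with
  | nil => simp [pvDivPerms, pvDivScan]
  | cons i is ih =>
    have hi : i < l.length := by rw [hl]; exact hidx i (by simp)
    have hget : l[i]? = some l[i] := List.getElem?_eq_getElem hi
    have herase : (l.eraseIdx i).length = n := by
      rw [List.length_eraseIdx, if_pos hi]; omega
    have hv0 : l[i] ≠ 0 := fun hz => h0 (hz ▸ List.getElem_mem hi)
    have herase0 : (0:Int) ∉ l.eraseIdx i := fun hm => h0 (List.mem_of_mem_eraseIdx hm)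
    have ht0 : (l.eraseIdx i).prod ≠ 0 := List.prod_ne_zero herase0
    have hPv : l.prod = l[i] * (l.eraseIdx i).prod := pv_prod_eraseIdx l i hi
    simp only [List.flatMap_cons, hget, List.map_cons]
    rw [pv_divPerms_append _ _ (by intro p hp; simp only [List.mem_map] at hp; obtain ⟨q, _, rfl⟩ := hp; simp)]
    rw [pv_divPerms_block _ l[i] (l.eraseIdx i).prod
      (by intro hnil; exact pv_perms_ne_nil n _ herase hnil)
      (by intro p hp
          have hperm := PySem.List.perm_of_mem_permutations (xs := l.eraseIdx i) (p := p) (herase ▸ hp)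
          exact ⟨fun hm => herase0 (hperm.mem_iff.mp hm), hperm.prod_eq⟩)]
    rw [ih (fun j hj => hidx j (by simp [hj]))]
    simp only [pvDivScan, List.getD_eq_getElem l 0 hi, hv0, ne_eq, not_false_eq_true, if_true]
    have hrest : PySem.Int.floordiv l.prod l[i] = (l.eraseIdx i).prod := by
      have hdvd : l[i] ∣ l.prod := ⟨(l.eraseIdx i).prod, hPv⟩
      rw [show PySem.Int.floordiv l.prod l[i] = l.prod / l[i] from Int.fdiv_eq_ediv_of_dvd hdvd,
        hPv, Int.mul_ediv_cancel_left _ hv0]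
    rw [hrest]
    by_cases hdv : (l.eraseIdx i).prod ∣ l[i]
    · have hq : PySem.Int.floordiv l[i] (l.eraseIdx i).prod = l[i] / (l.eraseIdx i).prod :=
        Int.fdiv_eq_ediv_of_dvd hdv
      have hmod : PySem.Int.mod l[i] (l.eraseIdx i).prod = 0 :=
        (PySem.Int.mod_eq_zero_iff_dvd _ _).mpr hdv
      simp only [ht0, hmod, and_true, not_false_eq_true, if_true, hq, true_and, hdv]
      by_cases hpos : l[i] / (l.eraseIdx i).prod > 0
      · rw [if_pos hpos, if_pos hpos, Option.some_or]
      · rw [if_neg hpos, if_neg hpos, Option.none_or]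
    · have hmod : PySem.Int.mod l[i] (l.eraseIdx i).prod ≠ 0 := by
        rw [ne_eq, PySem.Int.mod_eq_zero_iff_dvd]; exact hdv
      simp [ht0, hmod, hdv, Option.or]

theorem pv_sub_main (l : List Int) :
    pvSubPerms (PySem.List.permutations l l.length) = pvSubScan l.sum l := by
  cases hl : l with
  | nil => simp [PySem.List.permutations_zero, pvSubPerms, pvSubScan]
  | cons x xs =>
    have hlen : (x :: xs).length = xs.length + 1 := by simp
    rw [hlen, PySem.List.permutations_succ]
    have := pv_sub_flatMap (List.range (x :: xs).length) (x :: xs) xs.length hlen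
      (by intro i hi; simp only [List.mem_range] at hi; simpa using hi)
    rw [pv_map_getD_range] at this
    convert this using 2
    congr 1
    funext i
    cases h : (x :: xs)[i]? <;> simp

theorem pv_div_main (l : List Int) (h0 : (0:Int) ∉ l) :
    pvDivPerms (PySem.List.permutations l l.length) = pvDivScan l.prod l := by
  cases hl : l with
  | nil => simp [PySem.List.permutations_zero, pvDivPerms, pvDivScan]
  | cons x xs =>
    have hlen : (x :: xs).length = xs.length + 1 := by simp
    subst hl
    rw [hlen, PySem.List.permutations_succ]
    have := pv_div_flatMap (List.range (x :: xs).length) (x :: xs) xs.length hlen h0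
      (by intro i hi; simp only [List.mem_range] at hi; simpa using hi)
    rw [pv_map_getD_range] at this
    convert this using 2
    congr 1
    funext i
    cases h : (x :: xs)[i]? <;> simp

-- ===== VERDICT (by name: the statement is the Claim_ definition above) =====
theorem calculate_target_py_spec : Claim_equal_calculate_target_py := by
  intro op values _ hpre
  unfold Spec_calculate_target_py calculate_target_py calculate_target_py_alt
  unfold Pre_calculate_target_py at hpre
  by_cases hplus : op = "+"
  · simp [hplus]
  by_cases hmul : op = "*"
  · simp [hmul]
  by_cases hsub : op = "-"
  · simp only [hsub, beq_iff_eq, String.reduceEq, if_false, if_true]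
    by_cases hlen : values.length = 2
    · rw [if_pos hlen]
      match values, hlen with
      | [a, b], _ =>
        have hsum : ([a, b] : List Int).sum = a + b := by simp
        simp only [pvSubScan, hsum]
        by_cases h1 : a - b > 0
        · rw [if_pos h1, abs_of_pos h1, if_pos (show 2 * a > a + b by omega)]
          congr 1; ring
        · rw [if_neg h1]
          by_cases h2 : b - a > 0
          · rw [if_pos h2, abs_of_pos h2, if_neg (show ¬ 2 * a > a + b by omega),
              if_pos (show 2 * b > a + b by omega)]
            congr 1; ring
          · rw [if_neg h2, if_neg (show ¬ 2 * a > a + b by omega),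
              if_neg (show ¬ 2 * b > a + b by omega)]
    · rw [if_neg hlen]
      exact pv_sub_main values
  by_cases hdiv : op = "/"
  · simp only [hdiv, beq_iff_eq, String.reduceEq, if_false, if_true]
    by_cases hlen : values.length = 2
    · rw [if_pos hlen, if_pos hlen]
      match values, hlen with
      | [a, b], _ => rfl
    · rw [if_neg hlen, if_neg hlen]
      have hne : values ≠ [] := by
        intro h
        exact hpre (Or.inr ⟨hdiv, Or.inl h⟩)
      have hprod : values.foldl (· * ·) 1 = values.prod := List.prod_eq_foldl.symm
      rw [hprod]
      by_cases hone : values.length = 1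
      · match values, hone with
        | [v], _ =>
          by_cases hv : v = 0
          · subst hv; decide
          · have h1 : PySem.List.permutations [v] (([v] : List Int).length) = [[v]] := by
              show PySem.List.permutations [v] 1 = [[v]]
              rw [PySem.List.permutations_succ]
              simp [PySem.List.permutations_zero]
            rw [h1]
            have hfd : PySem.Int.floordiv v v = 1 := by
              rw [show PySem.Int.floordiv v v = v / v from Int.fdiv_eq_ediv_of_dvd dvd_rfl,
                Int.ediv_self hv]
            simp [pvDivPerms, pvDivChain, pvDivScan, hv, hfd]
      · have h3 : 3 ≤ values.length := by
          cases values with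
          | nil => exact absurd rfl hne
          | cons a l1 =>
            cases l1 with
            | nil => exact absurd rfl hone
            | cons b l2 =>
              cases l2 with
              | nil => exact absurd rfl hlen
              | cons c l3 => simp
        have h0 : (0:Int) ∉ values := by
          intro hm
          exact hpre (Or.inr ⟨hdiv, Or.inr (Or.inr ⟨h3, hm⟩)⟩)
        exact pv_div_main values h0
  · simp [hplus, hmul, hsub, hdiv]

theorem calculate_target_py_raises : Claim_raises_calculate_target_py := by
  unfold Claim_raises_calculate_target_py
  constructor
  · intro op values _ hr hpre
    unfold Pre_calculate_target_py at hpre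
    unfold Raises_calculate_target_py at hr
    rcases hr with ⟨hnil, hop | hop⟩ | ⟨hop, h3, h0⟩
    · exact hpre (Or.inl ⟨hop, hnil⟩)
    · exact hpre (Or.inr ⟨hop, Or.inl hnil⟩)
    · exact hpre (Or.inr ⟨hop, Or.inr (Or.inr ⟨h3, h0⟩)⟩)
  · refine ⟨by decide, by decide, by decide⟩

-- witness self-check: the raise-region witness really is the value stated in pvRaiseWitnessOut_
theorem pv_raise_witness_ok :
    calculate_target_py_alt pvRaiseWitness_calculate_target_py.1 pvRaiseWitness_calculate_target_py.2 =
      pvRaiseWitnessOut_calculate_target_py :=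
  calculate_target_py_raises.2.2.2
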